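-- pv_equiv track=rewrite | github.com/Ypz22/Universidad | TercerSemestre/Segundo Parcial/Modelos discretos/P3_D1_NRC14545_Yepez_Jefferson/P3_D2_NRC14546_Parra_Sebastian/P3_D2_NRC14546_Parra_Sebastian/P3_D2_NRC14546_Parra_Sebastian_No_3.py | Inorden
-- ===== SOURCE A (Python) =====
-- edges = [
--     ('a', 'b'), ('b','c'),('b','d'),('d','e'),('e','f')
-- ]
--
-- def encontrarHijos(nodo, arista):
--
--     hijos = []
--
--     for arista in edges:
--         padre, hijo = arista
--         if padre == nodo:
--             hijos.append(hijo)
--     return hijos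
--
-- def Inorden(nodo, edges, visitados = None):
--     if visitados is None:
--         visitados = []
--
--     hijos = encontrarHijos(nodo, edges)
--
--     if hijos:
--         Inorden(hijos[0],edges,visitados)
--
--     visitados.append(nodo)
--
--     if len(hijos) > 1:
--         Inorden(hijos[1],edges,visitados)
--
--     return visitados
-- ===== SOURCE B (Python) =====
-- edges = [
--     ('a', 'b'), ('b','c'),('b','d'),('d','e'),('e','f')
-- ]
--
-- def _left(n):
--     # first child of n in the module-global edge list
--     for padre, hijo in edges:
--         if padre == n:
--             return hijo
--     return None
--
-- def _right(n):
--     # second child of n in the module-global edge list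
--     seen = False
--     for padre, hijo in edges:
--         if padre == n:
--             if seen:
--                 return hijo
--             seen = True
--     return None
--
-- def Inorden(nodo, edges, visitados=None):
--     if visitados is None:
--         visitados = []
--     stack = []
--     cur = nodo
--     while cur is not None or stack:
--         if cur is not None:
--             stack.append(cur)
--             cur = _left(cur)
--         else:
--             node = stack.pop()
--             visitados.append(node)
--             cur = _right(node)
--     return visitados
-- ===== Notes on version B (the rewrite author's own statement) =====
-- stated objective: alternative
-- what changed: The recursive inorder traversal is replaced by an iterative explicit-stack loop (push while descending first-children, pop-append, then go to the second child), with the child list replaced by single-scan first/second-child lookups over the module-global edge list; the dead `edges` parameter and in-place appending into the caller's list are preserved.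
import Mathlib
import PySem

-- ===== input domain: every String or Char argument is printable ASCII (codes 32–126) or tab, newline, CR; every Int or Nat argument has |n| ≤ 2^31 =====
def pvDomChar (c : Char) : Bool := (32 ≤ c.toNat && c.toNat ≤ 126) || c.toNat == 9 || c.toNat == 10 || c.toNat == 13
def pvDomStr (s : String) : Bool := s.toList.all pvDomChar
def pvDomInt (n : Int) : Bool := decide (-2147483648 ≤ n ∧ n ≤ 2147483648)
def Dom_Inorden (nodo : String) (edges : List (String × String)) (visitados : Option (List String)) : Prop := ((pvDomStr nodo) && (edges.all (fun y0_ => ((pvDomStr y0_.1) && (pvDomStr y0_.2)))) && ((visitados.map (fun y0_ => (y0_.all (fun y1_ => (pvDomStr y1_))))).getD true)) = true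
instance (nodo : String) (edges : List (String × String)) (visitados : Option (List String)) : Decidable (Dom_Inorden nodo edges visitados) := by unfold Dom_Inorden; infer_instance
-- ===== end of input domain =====

-- B replaces A's recursive inorder with an iterative explicit-stack loop using single-scan
-- first/second-child lookups (objective: alternative). Both read the module-global edge list
-- (the `edges` parameter is dead in A and B); both append into the caller-supplied list in
-- Python, the theorems are about the return value.


-- the module-global `edges` list both Pythons actually read (the parameter is dead)
def globalEdges : List (String × String) :=
  [("a", "b"), ("b", "c"), ("b", "d"), ("d", "e"), ("e", "f")]

-- flip a disequality (used to resolve literal-on-the-left conditions in the proofs)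
theorem ne_flip {α : Type} {a b : α} (h : ¬ a = b) : ¬ b = a := fun e => h e.symm

-- ===== PORT A =====
-- for arista in edges: ... (note: iterates the GLOBAL edges, ignoring the `arista` argument)
def encontrarHijos (nodo : String) (_arista : List (String × String)) : List String :=
  globalEdges.foldl (fun hijos ar => if ar.1 == nodo then hijos ++ [ar.2] else hijos) []

-- rank of a node in the fixed global graph: termination measure for A's recursion
def rankA (n : String) : Nat :=
  if n = "a" then 4 else if n = "b" then 3 else if n = "d" then 2 else if n = "e" then 1 else 0

-- children of n in the fixed global graph, in closed form (used by the termination proofs)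
theorem enc_spec (n : String) (ar : List (String × String)) :
    encontrarHijos n ar =
      if n = "a" then ["b"] else if n = "b" then ["c", "d"]
      else if n = "d" then ["e"] else if n = "e" then ["f"] else [] := by
  simp only [encontrarHijos, globalEdges, List.foldl]
  by_cases h1 : n = "a"
  · subst h1; simp
  by_cases h2 : n = "b"
  · subst h2; simp
  by_cases h3 : n = "d"
  · subst h3; simp
  by_cases h4 : n = "e"
  · subst h4; simp
  · simp [h1, h2, h3, h4, ne_flip h1, ne_flip h2, ne_flip h3, ne_flip h4]

theorem rankA_child {n c : String} (ar : List (String × String))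
    (h : c ∈ encontrarHijos n ar) : rankA c < rankA n := by
  rw [enc_spec] at h
  by_cases h1 : n = "a"
  · subst h1; simp_all [rankA]
  by_cases h2 : n = "b"
  · subst h2; simp [h1] at h; simp [rankA, h1]
    rcases h with h | h <;> subst h <;> decide
  by_cases h3 : n = "d"
  · subst h3; simp_all [rankA]
  by_cases h4 : n = "e"
  · subst h4; simp_all [rankA]
  · simp [h1, h2, h3, h4] at h

-- the recursive body of A (visitados threaded functionally; Python appends in place)
def InordenGo (nodo : String) (visitados : List String) : List String :=
  let hijos := encontrarHijos nodo globalEdges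
  let v1 := if hne : hijos ≠ [] then InordenGo (hijos.head hne) visitados else visitados
  let v2 := v1 ++ [nodo]
  if hlen : 1 < hijos.length then InordenGo hijos[1] v2 else v2
termination_by rankA nodo
decreasing_by
  · exact rankA_child globalEdges (List.head_mem hne)
  · exact rankA_child globalEdges (List.getElem_mem hlen)

def Inorden (nodo : String) (edges : List (String × String)) (visitados : Option (List String)) : List String :=
  InordenGo nodo (visitados.getD [])

-- ===== PORT B =====
-- first child of n in the global edge list (single scan, early return)
def leftChild? : List (String × String) → String → Option String
  | [], _ => none
  | (p, h) :: rest, n => if p == n then some h else leftChild? rest n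

-- second child of n in the global edge list (single scan with a `seen` flag)
def rightChild?Go : List (String × String) → String → Bool → Option String
  | [], _, _ => none
  | (p, h) :: rest, n, seen =>
    if p == n then (if seen then some h else rightChild?Go rest n true)
    else rightChild?Go rest n seen

def rightChild? (n : String) : Option String := rightChild?Go globalEdges n false

-- closed forms of the lookups on the fixed global graph (used by the termination proofs)
theorem left_spec (n : String) :
    leftChild? globalEdges n =
      if n = "a" then some "b" else if n = "b" then some "c"
      else if n = "d" then some "e" else if n = "e" then some "f" else none := by
  simp only [globalEdges, leftChild?]
  by_cases h1 : n = "a"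
  · subst h1; simp
  by_cases h2 : n = "b"
  · subst h2; simp
  by_cases h3 : n = "d"
  · subst h3; simp
  by_cases h4 : n = "e"
  · subst h4; simp
  · simp [h1, h2, h3, h4, ne_flip h1, ne_flip h2, ne_flip h3, ne_flip h4]

theorem right_spec (n : String) :
    rightChild? n = if n = "b" then some "d" else none := by
  simp only [rightChild?, globalEdges, rightChild?Go]
  by_cases h1 : n = "a"
  · subst h1; simp
  by_cases h2 : n = "b"
  · subst h2; simp [h1, ne_flip h1]
  by_cases h3 : n = "d"
  · subst h3; simp [h1, h2, ne_flip h1, ne_flip h2]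
  by_cases h4 : n = "e"
  · subst h4; simp [h1, h2, h3, ne_flip h1, ne_flip h2, ne_flip h3]
  · simp [h1, h2, h3, h4, ne_flip h1, ne_flip h2, ne_flip h3, ne_flip h4]

-- subtree size in the fixed global graph: termination measure for B's loop
def sizeB (n : String) : Nat :=
  if n = "a" then 6 else if n = "b" then 5 else if n = "d" then 3 else if n = "e" then 2 else 1

def wOpt : Option String → Nat
  | none => 0
  | some c => 2 * sizeB c

def swOf (c : String) : Nat := wOpt (rightChild? c) + 1

theorem push_dec (c : String) : wOpt (leftChild? globalEdges c) + swOf c < 2 * sizeB c := by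
  unfold swOf
  rw [left_spec, right_spec]
  by_cases h1 : c = "a"
  · subst h1; decide
  by_cases h2 : c = "b"
  · subst h2; decide
  by_cases h3 : c = "d"
  · subst h3; decide
  by_cases h4 : c = "e"
  · subst h4; decide
  · simp [h1, h2, h3, h4, wOpt, sizeB]

-- the while-loop of B: descend pushing, else pop-append and go right
def loopB (cur : Option String) (stack : List String) (vis : List String) : List String :=
  match cur with
  | some c => loopB (leftChild? globalEdges c) (c :: stack) vis
  | none =>
    match stack with
    | [] => vis
    | c :: rest => loopB (rightChild? c) rest (vis ++ [c])
termination_by wOpt cur + (stack.map swOf).sum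
decreasing_by
  · have h1 : wOpt (some c) = 2 * sizeB c := rfl
    simp only [List.map_cons, List.sum_cons, h1]
    have := push_dec c
    omega
  · have h0 : wOpt (none : Option String) = 0 := rfl
    simp only [List.map_cons, List.sum_cons, h0, swOf]
    omega

def Inorden_alt (nodo : String) (edges : List (String × String)) (visitados : Option (List String)) : List String :=
  loopB (some nodo) [] (visitados.getD [])

-- ===== PRECONDITION & SPEC =====
def Spec_Inorden (nodo : String) (edges : List (String × String)) (visitados : Option (List String)) (out : List String) : Prop := out = Inorden_alt nodo edges visitados
instance (nodo : String) (edges : List (String × String)) (visitados : Option (List String)) (out : List String) : Decidable (Spec_Inorden nodo edges visitados out) := by unfold Spec_Inorden; infer_instance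

-- ===== CLAIM (what is proved, stated in full; the proofs are below) =====
def Claim_equal_Inorden : Prop := ∀ (nodo : String) (edges : List (String × String)) (visitados : Option (List String)), Dom_Inorden nodo edges visitados → Spec_Inorden nodo edges visitados (Inorden nodo edges visitados)

-- ===== LEMMAS AND PROOFS =====

-- the inorder listing of each node's subtree in the fixed global graph
def T (n : String) : List String :=
  if n = "a" then ["c", "b", "f", "e", "d", "a"]
  else if n = "b" then ["c", "b", "f", "e", "d"]
  else if n = "d" then ["f", "e", "d"]
  else if n = "e" then ["f", "e"]
  else [n]

-- ---- A side: InordenGo n v = v ++ T n, built up node by node ----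
theorem A_gen (n : String) (hn : n ≠ "a" ∧ n ≠ "b" ∧ n ≠ "d" ∧ n ≠ "e") (v : List String) :
    InordenGo n v = v ++ [n] := by
  rw [InordenGo]
  simp [enc_spec, hn.1, hn.2.1, hn.2.2.1, hn.2.2.2]

theorem A_f (v : List String) : InordenGo "f" v = v ++ ["f"] := A_gen _ (by decide) v
theorem A_c (v : List String) : InordenGo "c" v = v ++ ["c"] := A_gen _ (by decide) v

theorem A_e (v : List String) : InordenGo "e" v = v ++ ["f", "e"] := by
  rw [InordenGo]; simp [enc_spec, A_f]

theorem A_d (v : List String) : InordenGo "d" v = v ++ ["f", "e", "d"] := by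
  rw [InordenGo]; simp [enc_spec, A_e]

theorem A_b (v : List String) : InordenGo "b" v = v ++ ["c", "b", "f", "e", "d"] := by
  rw [InordenGo]; simp [enc_spec, A_c, A_d]

theorem A_a (v : List String) : InordenGo "a" v = v ++ ["c", "b", "f", "e", "d", "a"] := by
  rw [InordenGo]; simp [enc_spec, A_b]

theorem A_run (n : String) (v : List String) : InordenGo n v = v ++ T n := by
  by_cases h1 : n = "a"
  · subst h1; rw [A_a]; rfl
  by_cases h2 : n = "b"
  · subst h2; rw [A_b]; rfl
  by_cases h3 : n = "d"
  · subst h3; rw [A_d]; rfl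
  by_cases h4 : n = "e"
  · subst h4; rw [A_e]; rfl
  · rw [A_gen n ⟨h1, h2, h3, h4⟩]; simp [T, h1, h2, h3, h4]

-- ---- B side: loopB (some n) st v = loopB none st (v ++ T n), built up node by node ----
theorem B_gen (n : String) (hn : n ≠ "a" ∧ n ≠ "b" ∧ n ≠ "d" ∧ n ≠ "e")
    (st v : List String) : loopB (some n) st v = loopB none st (v ++ [n]) := by
  rw [loopB, left_spec]
  simp [hn.1, hn.2.1, hn.2.2.1, hn.2.2.2]
  rw [loopB]
  simp [right_spec, hn.2.1]

theorem B_f (st v : List String) : loopB (some "f") st v = loopB none st (v ++ ["f"]) :=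
  B_gen _ (by decide) st v
theorem B_c (st v : List String) : loopB (some "c") st v = loopB none st (v ++ ["c"]) :=
  B_gen _ (by decide) st v

theorem B_e (st v : List String) : loopB (some "e") st v = loopB none st (v ++ ["f", "e"]) := by
  rw [loopB, left_spec]; simp
  rw [B_f, loopB]; simp [right_spec]

theorem B_d (st v : List String) : loopB (some "d") st v = loopB none st (v ++ ["f", "e", "d"]) := by
  rw [loopB, left_spec]; simp
  rw [B_e, loopB]; simp [right_spec]

theorem B_b (st v : List String) :
    loopB (some "b") st v = loopB none st (v ++ ["c", "b", "f", "e", "d"]) := by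
  rw [loopB, left_spec]; simp
  rw [B_c, loopB]; simp [right_spec]
  rw [B_d]; simp

theorem B_a (st v : List String) :
    loopB (some "a") st v = loopB none st (v ++ ["c", "b", "f", "e", "d", "a"]) := by
  rw [loopB, left_spec]; simp
  rw [B_b, loopB]; simp [right_spec]

theorem loopB_base (w : List String) : loopB none [] w = w := by rw [loopB]

theorem B_run (n : String) (v : List String) : loopB (some n) [] v = v ++ T n := by
  by_cases h1 : n = "a"
  · subst h1; rw [B_a, loopB_base]; rfl
  by_cases h2 : n = "b"
  · subst h2; rw [B_b, loopB_base]; rfl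
  by_cases h3 : n = "d"
  · subst h3; rw [B_d, loopB_base]; rfl
  by_cases h4 : n = "e"
  · subst h4; rw [B_e, loopB_base]; rfl
  · rw [B_gen n ⟨h1, h2, h3, h4⟩, loopB_base]; simp [T, h1, h2, h3, h4]

-- ===== VERDICT (by name: the statement is the Claim_ definition above) =====
theorem Inorden_spec : Claim_equal_Inorden := by
  intro nodo edges visitados _
  unfold Spec_Inorden Inorden Inorden_alt
  rw [A_run, B_run]
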